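-- pv_equiv track=rewrite | github.com/aliceHillMetOffice/Advent-of-Code | day_8.py | calculate_antinode_positions
-- ===== SOURCE A (Python) =====
-- def calculate_antinode_positions(antenna_positions, map_height, map_width):
--     antinodes = set()
--     for frequency, positions in antenna_positions.items():
--         for i in range(len(positions)):
--             for j in range(i + 1, len(positions)):
--                 row1, col1 = positions[i]
--                 row2, col2 = positions[j]
--                 row_diff = row2 - row1
--                 col_diff = col2 - col1
--
--                 # Calculate potential antinode positions
--                 for k in range(-map_height, map_height):
--                     antinode = (row1 + k * row_diff, col1 + k * col_diff)
--                     if 0 <= antinode[0] < map_height and 0 <= antinode[1] < map_width: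
--                         antinodes.add(antinode)
--
--         # Include the positions of the antennas themselves as antinodes
--         if len(positions) > 1:
--             antinodes.update(positions)
--     return antinodes
-- ===== SOURCE B (Python) =====
-- def _clip(lo, hi, c, d, m):
--     # Narrow [lo, hi] to the k with 0 <= c + k*d < m.
--     if d > 0:
--         return max(lo, -(c // d)), min(hi, (m - 1 - c) // d)
--     if d < 0:
--         return max(lo, -((m - 1 - c) // (-d))), min(hi, c // (-d))
--     if 0 <= c < m:
--         return lo, hi
--     return lo, lo - 1
--
--
-- def calculate_antinode_positions(antenna_positions, map_height, map_width):
--     antinodes = set()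
--     for frequency, positions in antenna_positions.items():
--         n = len(positions)
--         for i in range(n):
--             row1, col1 = positions[i]
--             for j in range(i + 1, n):
--                 row2, col2 = positions[j]
--                 row_diff = row2 - row1
--                 col_diff = col2 - col1
--                 lo, hi = _clip(-map_height, map_height - 1, row1, row_diff, map_height)
--                 lo, hi = _clip(lo, hi, col1, col_diff, map_width)
--                 for k in range(lo, hi + 1):
--                     antinodes.add((row1 + k * row_diff, col1 + k * col_diff))
--         if len(positions) > 1:
--             antinodes.update(positions)
--     return antinodes
-- ===== Notes on version B (the rewrite author's own statement) =====
-- stated objective: faster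
-- what changed: Instead of scanning every k in range(-map_height, map_height) per antenna pair and bounds-testing each candidate, B intersects the row and column in-bounds inequalities into one exact k-interval via floor divisions and iterates only over in-range k, so each pair costs O(1 + output).
import Mathlib
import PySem

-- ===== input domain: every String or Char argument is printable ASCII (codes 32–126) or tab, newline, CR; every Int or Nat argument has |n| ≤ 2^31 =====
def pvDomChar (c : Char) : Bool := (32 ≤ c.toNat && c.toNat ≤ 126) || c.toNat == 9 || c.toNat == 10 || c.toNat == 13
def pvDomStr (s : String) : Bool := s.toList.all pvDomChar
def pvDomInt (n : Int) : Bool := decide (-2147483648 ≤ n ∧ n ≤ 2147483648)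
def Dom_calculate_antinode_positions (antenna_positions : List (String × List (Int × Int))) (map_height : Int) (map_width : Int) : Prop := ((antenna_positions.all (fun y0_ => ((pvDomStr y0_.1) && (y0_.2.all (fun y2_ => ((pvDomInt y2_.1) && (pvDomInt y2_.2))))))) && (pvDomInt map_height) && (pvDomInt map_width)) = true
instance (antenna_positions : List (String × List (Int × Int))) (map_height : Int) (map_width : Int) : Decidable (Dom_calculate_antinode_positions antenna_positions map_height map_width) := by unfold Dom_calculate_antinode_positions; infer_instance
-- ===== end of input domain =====

-- B replaces A's scan of all k in range(-map_height, map_height) per antenna pair by the exact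
-- in-bounds k-interval obtained from the row/col bound inequalities (objective: faster).
-- The dict argument arrives as an association list; both ports read it through PySem.Dict.ofList
-- (Python dict semantics: later duplicate keys overwrite, position of the first).

-- ===== PORT A =====
-- the chained comparison 0 <= antinode[0] < map_height and 0 <= antinode[1] < map_width
def pvInBounds (H W : Int) (an : Int × Int) : Bool :=
  decide (0 ≤ an.1 ∧ an.1 < H ∧ 0 ≤ an.2 ∧ an.2 < W)

-- A's innermost loop: for k in range(-map_height, map_height): … if in bounds: antinodes.add(…)
def pvAPair (H W r1 c1 rd cd : Int) (acc : PySem.Set (Int × Int)) : PySem.Set (Int × Int) :=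
  (PySem.List.pyRange (-H) H 1).foldl
    (fun acc k =>
      let an : Int × Int := (r1 + k * rd, c1 + k * cd)
      if pvInBounds H W an then PySem.Set.add acc an else acc) acc

def calculate_antinode_positions (antenna_positions : List (String × List (Int × Int))) (map_height : Int) (map_width : Int) : List (Int × Int) :=
  ((PySem.Dict.ofList antenna_positions).items).foldl
    (fun antinodes fp =>
      let positions := fp.2
      let antinodes :=
        (PySem.List.pyRange 0 (PySem.List.len positions) 1).foldl
          (fun acc i =>
            (PySem.List.pyRange (i + 1) (PySem.List.len positions) 1).foldl
              (fun acc j =>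
                -- indices i, j are produced by range(len(positions)) so always in range
                let p1 := PySem.List.pyGetD positions i (0, 0)
                let p2 := PySem.List.pyGetD positions j (0, 0)
                pvAPair map_height map_width p1.1 p1.2 (p2.1 - p1.1) (p2.2 - p1.2) acc) acc)
          antinodes
      if 1 < PySem.List.len positions then PySem.Set.update antinodes positions else antinodes)
    PySem.Set.empty

-- ===== PORT B =====
-- Source B's _clip: narrow [lo, hi] to the k with 0 <= c + k*d < m
def pvClip (lo hi c d m : Int) : Int × Int :=
  if 0 < d then
    (max lo (-(PySem.Int.floordiv c d)), min hi (PySem.Int.floordiv (m - 1 - c) d))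
  else if d < 0 then
    (max lo (-(PySem.Int.floordiv (m - 1 - c) (-d))), min hi (PySem.Int.floordiv c (-d)))
  else if 0 ≤ c ∧ c < m then (lo, hi)
  else (lo, lo - 1)

-- B's per-pair work: clip twice, then add every k of the interval unconditionally
def pvBPair (H W r1 c1 rd cd : Int) (acc : PySem.Set (Int × Int)) : PySem.Set (Int × Int) :=
  let lh1 := pvClip (-H) (H - 1) r1 rd H
  let lh2 := pvClip lh1.1 lh1.2 c1 cd W
  (PySem.List.pyRange lh2.1 (lh2.2 + 1) 1).foldl
    (fun acc k => PySem.Set.add acc (r1 + k * rd, c1 + k * cd)) acc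

def calculate_antinode_positions_alt (antenna_positions : List (String × List (Int × Int))) (map_height : Int) (map_width : Int) : List (Int × Int) :=
  ((PySem.Dict.ofList antenna_positions).items).foldl
    (fun antinodes fp =>
      let positions := fp.2
      let n := PySem.List.len positions
      let antinodes :=
        (PySem.List.pyRange 0 n 1).foldl
          (fun acc i =>
            let p1 := PySem.List.pyGetD positions i (0, 0)
            (PySem.List.pyRange (i + 1) n 1).foldl
              (fun acc j =>
                let p2 := PySem.List.pyGetD positions j (0, 0)
                pvBPair map_height map_width p1.1 p1.2 (p2.1 - p1.1) (p2.2 - p1.2) acc) acc)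
          antinodes
      if 1 < n then PySem.Set.update antinodes positions else antinodes)
    PySem.Set.empty

-- ===== PRECONDITION & SPEC =====
def Spec_calculate_antinode_positions (antenna_positions : List (String × List (Int × Int))) (map_height : Int) (map_width : Int) (out : List (Int × Int)) : Prop := out = calculate_antinode_positions_alt antenna_positions map_height map_width
instance (antenna_positions : List (String × List (Int × Int))) (map_height : Int) (map_width : Int) (out : List (Int × Int)) : Decidable (Spec_calculate_antinode_positions antenna_positions map_height map_width out) := by unfold Spec_calculate_antinode_positions; infer_instance

-- ===== CLAIM (what is proved, stated in full; the proofs are below) =====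
def Claim_equal_calculate_antinode_positions : Prop := ∀ (antenna_positions : List (String × List (Int × Int))) (map_height : Int) (map_width : Int), Dom_calculate_antinode_positions antenna_positions map_height map_width → Spec_calculate_antinode_positions antenna_positions map_height map_width (calculate_antinode_positions antenna_positions map_height map_width)

-- ===== LEMMAS AND PROOFS =====

-- pvClip is exactly the bound inequality on k
theorem pvClip_iff (lo hi c d m k : Int) :
    ((pvClip lo hi c d m).1 ≤ k ∧ k ≤ (pvClip lo hi c d m).2) ↔
      (lo ≤ k ∧ k ≤ hi ∧ 0 ≤ c + k * d ∧ c + k * d < m) := by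
  unfold pvClip
  split_ifs with h1 h2 h3
  · have hA : (-(PySem.Int.floordiv c d) ≤ k) ↔ (0 ≤ c + k * d) := by
      rw [neg_le, PySem.Int.le_floordiv_iff_mul_le h1]
      constructor <;> intro h <;> nlinarith
    have hB : (k ≤ PySem.Int.floordiv (m - 1 - c) d) ↔ (c + k * d < m) := by
      rw [PySem.Int.le_floordiv_iff_mul_le h1]
      constructor <;> intro h <;> nlinarith
    simp only [max_le_iff, le_min_iff, hA, hB]
    tauto
  · have hd : 0 < -d := by omega
    have hA : (-(PySem.Int.floordiv (m - 1 - c) (-d)) ≤ k) ↔ (c + k * d < m) := by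
      rw [neg_le, PySem.Int.le_floordiv_iff_mul_le hd]
      constructor <;> intro h <;> nlinarith
    have hB : (k ≤ PySem.Int.floordiv c (-d)) ↔ (0 ≤ c + k * d) := by
      rw [PySem.Int.le_floordiv_iff_mul_le hd]
      constructor <;> intro h <;> nlinarith
    simp only [max_le_iff, le_min_iff, hA, hB]
    tauto
  · have hd : d = 0 := by omega
    subst hd; simp only [mul_zero, add_zero]; tauto
  · have hd : d = 0 := by omega
    subst hd; simp only [mul_zero, add_zero]
    omega

-- two strictly increasing integer lists with the same members are equal
theorem pvSortedExt (l1 l2 : List Int) (h1 : l1.Pairwise (· < ·)) (h2 : l2.Pairwise (· < ·))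
    (hm : ∀ k, k ∈ l1 ↔ k ∈ l2) : l1 = l2 :=
  ((List.perm_ext_iff_of_nodup h1.nodup h2.nodup).2 hm).eq_of_pairwise
    (fun _ _ _ _ hab hba => absurd hba (not_lt.2 (le_of_lt hab))) h1 h2

-- filtering range(A,B) by "k in [lo,hi]" (with [lo,hi] ⊆ [A,B)) is range(lo, hi+1)
theorem pvRangeFilter (A B lo hi : Int) (p : Int → Bool)
    (hmem : ∀ k, A ≤ k → k < B → (p k = true ↔ (lo ≤ k ∧ k ≤ hi)))
    (hsub : ∀ k, lo ≤ k → k ≤ hi → A ≤ k ∧ k < B) :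
    (PySem.List.pyRange A B 1).filter p = PySem.List.pyRange lo (hi + 1) 1 := by
  apply pvSortedExt
  · exact (PySem.List.pairwise_lt_pyRange_one A B).filter p
  · exact PySem.List.pairwise_lt_pyRange_one lo (hi + 1)
  · intro k
    simp only [List.mem_filter, PySem.List.mem_pyRange_one]
    constructor
    · rintro ⟨⟨hA, hB⟩, hp⟩
      have := (hmem k hA hB).1 hp
      omega
    · rintro ⟨hk1, hk2⟩
      have hs := hsub k hk1 (by omega)
      exact ⟨⟨hs.1, hs.2⟩, (hmem k hs.1 hs.2).2 ⟨hk1, by omega⟩⟩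

-- per antenna pair: A's guarded scan of range(-H, H) equals B's scan of the clipped interval
theorem pvPair_eq : @pvAPair = @pvBPair := by
  funext H W r1 c1 rd cd acc
  unfold pvAPair pvBPair
  have key : (PySem.List.pyRange (-H) H 1).filter
        (fun k => pvInBounds H W (r1 + k * rd, c1 + k * cd)) =
      PySem.List.pyRange (pvClip (pvClip (-H) (H - 1) r1 rd H).1 (pvClip (-H) (H - 1) r1 rd H).2 c1 cd W).1
        ((pvClip (pvClip (-H) (H - 1) r1 rd H).1 (pvClip (-H) (H - 1) r1 rd H).2 c1 cd W).2 + 1) 1 := by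
    apply pvRangeFilter
    intro k hA hB
    rw [pvClip_iff, ← and_assoc, pvClip_iff]
    simp only [pvInBounds, decide_eq_true_eq]
    constructor
    · rintro ⟨a1, a2, a3, a4⟩
      exact ⟨⟨hA, by omega, a1, a2⟩, a3, a4⟩
    · rintro ⟨⟨-, -, a1, a2⟩, a3, a4⟩
      exact ⟨a1, a2, a3, a4⟩
    · intro k hk1 hk2
      have h2 := (pvClip_iff (pvClip (-H) (H - 1) r1 rd H).1 (pvClip (-H) (H - 1) r1 rd H).2 c1 cd W k).1 ⟨hk1, hk2⟩
      have h3 := (pvClip_iff (-H) (H - 1) r1 rd H k).1 ⟨h2.1, h2.2.1⟩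
      omega
  show List.foldl (fun acc k => if pvInBounds H W (r1 + k * rd, c1 + k * cd) = true then PySem.Set.add acc (r1 + k * rd, c1 + k * cd) else acc) acc (PySem.List.pyRange (-H) H 1)
      = List.foldl (fun acc k => PySem.Set.add acc (r1 + k * rd, c1 + k * cd)) acc
          (PySem.List.pyRange (pvClip (pvClip (-H) (H - 1) r1 rd H).1 (pvClip (-H) (H - 1) r1 rd H).2 c1 cd W).1
            ((pvClip (pvClip (-H) (H - 1) r1 rd H).1 (pvClip (-H) (H - 1) r1 rd H).2 c1 cd W).2 + 1) 1)
  rw [← key, List.foldl_filter]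

-- ===== VERDICT (by name: the statement is the Claim_ definition above) =====
theorem calculate_antinode_positions_spec : Claim_equal_calculate_antinode_positions := by
  intro antenna_positions map_height map_width _
  unfold Spec_calculate_antinode_positions
  unfold calculate_antinode_positions calculate_antinode_positions_alt
  rw [pvPair_eq]
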